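-- pv_equiv track=rewrite | github.com/s-ankur/nlp-porter-stemmer | porter_stemmer.py | consonant_y
-- ===== SOURCE A (Python) =====
-- def consonant_y(word):
--     """
--     Converts the consonatal y to Y. Consonantal y is the y that is not after a consonant
--
--     >>> consonant_y("may")
--     'maY'
--
--     >>> consonant_y("yam")
--     'Yam'
--
--     """
--     ans = ""
--     for i, j in enumerate(word):
--         if j == 'y' and word[i - 1:i] in "aeiou":
--             ans += "Y"
--         else:
--             ans += j
--     return ans
-- ===== SOURCE B (Python) =====
-- def consonant_y(word):
--     # Scan for vowel+'y' two-char matches with lookahead instead of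
--     # checking each index's predecessor via slicing; leading 'y' handled once.
--     if word.startswith('y'):
--         out, i = ['Y'], 1
--     else:
--         out, i = [], 0
--     n = len(word)
--     while i < n:
--         c = word[i]
--         if c in 'aeiou' and i + 1 < n and word[i + 1] == 'y':
--             out.append(c)
--             out.append('Y')
--             i += 2
--         else:
--             out.append(c)
--             i += 1
--     return ''.join(out)
-- ===== Notes on version B (the rewrite author's own statement) =====
-- stated objective: alternative
-- what changed: B scans the word with a lookahead, consuming vowel+'y' two-character matches at once (leading 'y' handled once up front) and joining collected pieces, instead of A's per-index loop that slices out each character's predecessor and tests substring membership.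
import Mathlib
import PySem

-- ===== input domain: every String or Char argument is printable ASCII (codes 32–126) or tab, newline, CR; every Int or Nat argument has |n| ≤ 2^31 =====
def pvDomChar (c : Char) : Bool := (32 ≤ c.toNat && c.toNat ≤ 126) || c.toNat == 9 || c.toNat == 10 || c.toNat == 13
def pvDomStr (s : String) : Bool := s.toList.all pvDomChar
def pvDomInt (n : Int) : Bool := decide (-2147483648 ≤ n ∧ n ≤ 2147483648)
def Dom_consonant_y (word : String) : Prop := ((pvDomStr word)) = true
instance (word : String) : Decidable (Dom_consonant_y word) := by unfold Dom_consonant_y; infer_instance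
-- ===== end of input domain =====

-- B replaces A's per-index loop (predecessor via slicing + substring test) by a lookahead scan
-- consuming vowel+'y' two-character matches at once; same O(n) cost ("alternative", not faster).

-- ===== PORT A =====
-- literal port of A: enumerate loop, predecessor slice word[i-1:i], substring test "in 'aeiou'",
-- the answer built by appending one character per step (Python string += ported as char-list append).
def consonant_y (word : String) : String :=
  String.ofList ((PySem.List.enumerate word.toList 0).foldl
    (fun ans ij =>
      if ij.2 == 'y' && PySem.Chars.isIn (PySem.List.slice word.toList (some (ij.1 - 1)) (some ij.1)) "aeiou".toList
      then ans ++ ['Y'] else ans ++ [ij.2]) [])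

-- ===== PORT B =====
-- B's while-loop over indices with step 1 or 2 becomes the obvious recursion on the char-list
-- suffix: a vowel followed by 'y' consumes two chars and emits both, otherwise one char is emitted.
def pvGoB (cs : List Char) : List Char :=
  match cs with
  | [] => []
  | c :: 'y' :: rest =>
      if c ∈ (['a', 'e', 'i', 'o', 'u'] : List Char) then c :: 'Y' :: pvGoB rest
      else c :: pvGoB ('y' :: rest)
  | c :: rest => c :: pvGoB rest

def consonant_y_alt (word : String) : String :=
  match word.toList with
  | 'y' :: rest => String.ofList ('Y' :: pvGoB rest)   -- word.startswith('y')
  | cs => String.ofList (pvGoB cs)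

-- ===== PRECONDITION & SPEC =====
def Spec_consonant_y (word : String) (out : String) : Prop := out = consonant_y_alt word
instance (word : String) (out : String) : Decidable (Spec_consonant_y word out) := by unfold Spec_consonant_y; infer_instance

-- ===== CLAIM (what is proved, stated in full; the proofs are below) =====
def Claim_equal_consonant_y : Prop := ∀ (word : String), Dom_consonant_y word → Spec_consonant_y word (consonant_y word)

-- ===== LEMMAS AND PROOFS =====

def pvVowel (c : Char) : Bool := c ∈ (['a', 'e', 'i', 'o', 'u'] : List Char)

-- reference pass: one char at a time, carrying "previous char is a vowel (or start of word)"
def pvRef (pv : Bool) : List Char → List Char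
  | [] => []
  | c :: rest => (if c == 'y' && pv then 'Y' else c) :: pvRef (pvVowel c) rest

-- A's per-index step as a function of (index, char)
def pvStepA (cs : List Char) (ij : Int × Char) : Char :=
  if ij.2 == 'y' && PySem.Chars.isIn (PySem.List.slice cs (some (ij.1 - 1)) (some ij.1)) "aeiou".toList
  then 'Y' else ij.2

lemma pvRef_true_of_head_ne (rest : List Char) (h : ∀ c ∈ rest.head?, c ≠ 'y') :
    pvRef true rest = pvRef false rest := by
  cases rest with
  | nil => rfl
  | cons c r =>
    have hc : c ≠ 'y' := h c rfl
    simp [pvRef, hc]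

lemma pvGoB_eq_pvRef (cs : List Char) : pvGoB cs = pvRef false cs := by
  fun_induction pvGoB cs with
  | case1 => rfl
  | case2 c rest hv ih => simp [pvRef, pvVowel, hv, ih]
  | case3 c rest hv ih => simp [pvRef, pvVowel, hv, ih]
  | case4 c rest h ih =>
    simp only [pvRef, Bool.and_false, if_neg Bool.false_ne_true, ih]
    by_cases hv : pvVowel c = true
    · rw [hv]
      congr 1
      rw [pvRef_true_of_head_ne]
      intro d hd hdy
      cases rest with
      | nil => simp at hd
      | cons e r =>
        simp at hd
        exact h r (by rw [hd, hdy])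
    · rw [Bool.not_eq_true] at hv; rw [hv]

lemma pvSingle (d : Char) : PySem.Chars.isIn [d] "aeiou".toList = pvVowel d := by
  have h : "aeiou".toList = (['a','e','i','o','u'] : List Char) := by decide
  rw [h]
  by_cases hd : d ∈ (['a','e','i','o','u'] : List Char)
  · simp [pvVowel, hd, PySem.Chars.isIn_iff_infix, (List.singleton_infix_iff d _).2 hd]
  · simp [pvVowel, hd]
    rw [PySem.Chars.isIn_eq_false_iff]
    exact fun hin => hd ((List.singleton_infix_iff d _).1 hin)

lemma pvMapA_tail (rest : List Char) : ∀ (q : List Char) (d : Char),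
    (PySem.List.enumerate rest ((q.length : Int) + 1)).map (pvStepA (q ++ [d] ++ rest))
      = pvRef (pvVowel d) rest := by
  induction rest with
  | nil => intro q d; rfl
  | cons c rest ih =>
    intro q d
    rw [PySem.List.enumerate_cons, List.map_cons]
    have hslice : PySem.List.slice (q ++ [d] ++ c :: rest) (some ((q.length : Int) + 1 - 1))
        (some ((q.length : Int) + 1)) = [d] := by
      have h1 : ((q.length : Int) + 1 - 1) = ((q.length : Nat) : Int) := by ring
      have h2 : ((q.length : Int) + 1) = (((q.length + 1 : Nat)) : Int) := by push_cast; ring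
      rw [h1, h2, PySem.List.slice_natCast, List.append_assoc, List.drop_left]
      simp
    have hhead : pvStepA (q ++ [d] ++ c :: rest) ((q.length : Int) + 1, c)
        = (if c == 'y' && pvVowel d then 'Y' else c) := by
      simp only [pvStepA, hslice, pvSingle]
    rw [hhead]
    have hih := ih (q ++ [d]) c
    have harr : (q ++ [d]) ++ [c] ++ rest = q ++ [d] ++ c :: rest := by
      simp [List.append_assoc]
    have hlen : (((q ++ [d]).length : Int) + 1) = ((q.length : Int) + 1 + 1) := by
      simp [List.length_append]
    rw [harr, hlen] at hih
    rw [hih]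
    simp [pvRef]

lemma pvMapA (cs : List Char) : (PySem.List.enumerate cs 0).map (pvStepA cs) = pvRef true cs := by
  cases cs with
  | nil => rfl
  | cons c rest =>
    rw [PySem.List.enumerate_cons, List.map_cons]
    have hslice : PySem.List.slice (c :: rest) (some (-1 : Int)) (some (0:Int)) = [] := by
      apply List.eq_nil_of_length_eq_zero
      rw [PySem.List.length_slice]
      simp [PySem.List.clampIdx]
    have hhead : pvStepA (c :: rest) (0, c) = (if c == 'y' then 'Y' else c) := by
      simp [pvStepA, hslice, PySem.Chars.isIn_nil]
    have hih := pvMapA_tail rest ([] : List Char) c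
    simp only [List.length_nil, Nat.cast_zero, zero_add, List.nil_append, List.singleton_append] at hih
    norm_num at hih ⊢
    rw [hhead, hih]
    simp [pvRef]

lemma pvAlt_eq (word : String) : consonant_y_alt word = String.ofList (pvRef true word.toList) := by
  unfold consonant_y_alt
  cases h : word.toList with
  | nil => rfl
  | cons c rest =>
    by_cases hc : c = 'y'
    · subst hc
      simp [pvRef, pvGoB_eq_pvRef, pvVowel]
    · split
      · next r heq =>
        injection heq with h1 _
        exact absurd h1 hc
      · next =>
        rw [pvGoB_eq_pvRef, ← pvRef_true_of_head_ne]
        intro d hd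
        simp at hd
        exact fun hy => hc (hd.trans hy)

-- ===== VERDICT (by name: the statement is the Claim_ definition above) =====
theorem consonant_y_spec : Claim_equal_consonant_y := by
  intro word _
  unfold Spec_consonant_y consonant_y
  rw [pvAlt_eq]
  have hfun : (fun (ans : List Char) (ij : Int × Char) =>
      if ij.2 == 'y' && PySem.Chars.isIn (PySem.List.slice word.toList (some (ij.1 - 1)) (some ij.1)) "aeiou".toList
      then ans ++ ['Y'] else ans ++ [ij.2])
      = (fun ans ij => ans ++ [pvStepA word.toList ij]) := by
    funext a ij
    simp only [pvStepA]
    split <;> rfl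
  rw [hfun, PySem.List.foldl_append_singleton_eq_map, pvMapA, List.nil_append]
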